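-- pv_equiv track=rewrite | github.com/ngkatie/music-recommender | musicrecplus.py | find_best_user
-- ===== SOURCE A (Python) =====
-- def num_matches(user_prefs, stored_prefs):
--     ''' Returns the number of elements that match between two lists '''
--
--     x = list(user_prefs)
--     x.sort()
--
--     y = list(stored_prefs)
--     y.sort()
--
--     i, j, count = 0,0,0                 # i is index for userPrefs, j is index for storedPrefs
--     while i < len(x) and j < len(y):
--         if x[i] == y[j]:
--             count += 1
--             i += 1
--             j += 1
--         elif x[i] > y[j]:
--             j += 1
--         else:
--             i += 1
--     return count
--
-- def find_best_user(curr_user, prefs, user_map):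
--     ''' Finds the best user with the most common prefs to the current user '''
--     users = user_map.keys()
--     possible_users = []
--     for user in users:
--         if '$' not in user:
--             possible_users.append(user)
--     best_user = None
--     best_score = 0
--     for user in possible_users:
--         score = num_matches(prefs, user_map[user])
--         if score > best_score and curr_user != user and prefs != user_map[user]:
--             best_score = score
--             best_user = [user]
--         elif score == best_score and curr_user != user and prefs != user_map[user] and best_user != None:
--             best_score = score
--             best_user.append(user)
--     return best_user
-- ===== SOURCE B (Python) =====
-- def num_matches(user_prefs, stored_prefs):
--     ''' Returns the number of elements that match between two lists '''
--     x = list(user_prefs)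
--     x.sort()
--     y = list(stored_prefs)
--     y.sort()
--     i, j, count = 0, 0, 0
--     while i < len(x) and j < len(y):
--         if x[i] == y[j]:
--             count += 1
--             i += 1
--             j += 1
--         elif x[i] > y[j]:
--             j += 1
--         else:
--             i += 1
--     return count
--
-- def find_best_user(curr_user, prefs, user_map):
--     ''' Finds the best user with the most common prefs to the current user '''
--     scored = [(user, num_matches(prefs, user_map[user]))
--               for user in user_map
--               if '$' not in user and curr_user != user and prefs != user_map[user]]
--     best = max((s for _, s in scored), default=0)
--     if best == 0:
--         return None
--     return [u for u, s in scored if s == best]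
-- ===== Notes on version B (the rewrite author's own statement) =====
-- stated objective: simpler
-- what changed: Replaces A's interleaved running-best/tie-list loop with a three-step decomposition: build the list of (eligible user, score) pairs, take the maximum score with default 0, then collect all users attaining it (None when the maximum is 0).
import Mathlib
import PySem

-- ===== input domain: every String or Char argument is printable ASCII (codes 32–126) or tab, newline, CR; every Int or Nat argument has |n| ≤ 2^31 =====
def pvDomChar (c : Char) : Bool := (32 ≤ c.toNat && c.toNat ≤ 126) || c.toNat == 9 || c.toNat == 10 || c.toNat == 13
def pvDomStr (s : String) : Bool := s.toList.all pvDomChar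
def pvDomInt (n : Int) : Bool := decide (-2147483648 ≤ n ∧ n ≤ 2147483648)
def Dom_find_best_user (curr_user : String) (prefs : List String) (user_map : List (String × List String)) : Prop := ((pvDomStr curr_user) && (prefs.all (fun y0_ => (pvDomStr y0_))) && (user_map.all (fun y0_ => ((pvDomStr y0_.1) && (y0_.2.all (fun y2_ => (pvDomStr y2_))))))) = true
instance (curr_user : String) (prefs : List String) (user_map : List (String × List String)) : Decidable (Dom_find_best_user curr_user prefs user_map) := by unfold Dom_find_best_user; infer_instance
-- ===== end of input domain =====

-- B replaces A's interleaved running-best/tie-list loop by a plain decomposition: build the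
-- (eligible user, score) table, take its maximum score (default 0), then collect all argmax
-- users; objective: simpler (same asymptotic cost).

-- ===== PORT A =====
-- num_matches: sorts both lists, then the two-index merge loop, ported as structural
-- recursion on the two (sorted) suffixes with the same comparisons and counter.
def nmLoop : List String → List String → Int → Int
  | x :: xs, y :: ys, count =>
    if x == y then nmLoop xs ys (count + 1)
    else if x > y then nmLoop (x :: xs) ys count
    else nmLoop xs (y :: ys) count
  | _, _, count => count
termination_by xs ys _ => xs.length + ys.length
decreasing_by all_goals (simp; try omega)

def num_matches (user_prefs : List String) (stored_prefs : List String) : Int :=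
  nmLoop (PySem.List.sorted user_prefs (fun s => s) false)
         (PySem.List.sorted stored_prefs (fun s => s) false) 0

def find_best_user (curr_user : String) (prefs : List String) (user_map : List (String × List String)) : Option (List String) :=
  let users := PySem.Dict.keys (PySem.Dict.mk user_map)
  let possible_users := users.foldl
    (fun acc user => if !PySem.Str.isIn "$" user then acc ++ [user] else acc) []
  let r := possible_users.foldl
    (fun (st : Option (List String) × Int) user =>
      let score := num_matches prefs (PySem.Dict.getD (PySem.Dict.mk user_map) user [])
      if score > st.2 ∧ curr_user ≠ user ∧ prefs ≠ PySem.Dict.getD (PySem.Dict.mk user_map) user [] then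
        (some [user], score)
      else if score == st.2 ∧ curr_user ≠ user ∧ prefs ≠ PySem.Dict.getD (PySem.Dict.mk user_map) user [] ∧ st.1 ≠ none then
        (st.1.map (fun bl => bl ++ [user]), score)
      else st)
    (none, 0)
  r.1

-- ===== PORT B =====
def find_best_user_alt (curr_user : String) (prefs : List String) (user_map : List (String × List String)) : Option (List String) :=
  let d := PySem.Dict.mk user_map
  let scored := ((PySem.Dict.keys d).filter (fun user =>
      !PySem.Str.isIn "$" user && decide (curr_user ≠ user) && decide (prefs ≠ PySem.Dict.getD d user []))).map
      (fun user => (user, num_matches prefs (PySem.Dict.getD d user [])))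
  let best := (PySem.List.max? (scored.map Prod.snd) (fun s => s)).getD 0
  if best == 0 then none
  else some ((scored.filter (fun p => p.2 == best)).map Prod.fst)

-- ===== PRECONDITION & SPEC =====
def Spec_find_best_user (curr_user : String) (prefs : List String) (user_map : List (String × List String)) (out : Option (List String)) : Prop := out = find_best_user_alt curr_user prefs user_map
instance (curr_user : String) (prefs : List String) (user_map : List (String × List String)) (out : Option (List String)) : Decidable (Spec_find_best_user curr_user prefs user_map out) := by unfold Spec_find_best_user; infer_instance

-- ===== CLAIM (what is proved, stated in full; the proofs are below) =====
def Claim_equal_find_best_user : Prop := ∀ (curr_user : String) (prefs : List String) (user_map : List (String × List String)), Dom_find_best_user curr_user prefs user_map → Spec_find_best_user curr_user prefs user_map (find_best_user curr_user prefs user_map)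

-- ===== LEMMAS AND PROOFS =====

-- the stored value of a user, the score, the loop-internal eligibility test, and the
-- running maximum of eligible scores along a user list
def pvVal (user_map : List (String × List String)) (u : String) : List String :=
  PySem.Dict.getD (PySem.Dict.mk user_map) u []

def pvScore (prefs : List String) (user_map : List (String × List String)) (u : String) : Int :=
  num_matches prefs (pvVal user_map u)

def pvEA (curr_user : String) (prefs : List String) (user_map : List (String × List String)) (u : String) : Bool :=
  decide (curr_user ≠ u) && decide (prefs ≠ pvVal user_map u)

def pvMax (curr_user : String) (prefs : List String) (user_map : List (String × List String)) : List String → Int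
  | [] => 0
  | u :: t => if pvEA curr_user prefs user_map u
              then max (pvScore prefs user_map u) (pvMax curr_user prefs user_map t)
              else pvMax curr_user prefs user_map t

-- A's inner loop body, named for the proofs (definitionally the lambda in find_best_user)
def pvStep (curr_user : String) (prefs : List String) (user_map : List (String × List String))
    (st : Option (List String) × Int) (user : String) : Option (List String) × Int :=
  let score := num_matches prefs (PySem.Dict.getD (PySem.Dict.mk user_map) user [])
  if score > st.2 ∧ curr_user ≠ user ∧ prefs ≠ PySem.Dict.getD (PySem.Dict.mk user_map) user [] then
    (some [user], score)
  else if score == st.2 ∧ curr_user ≠ user ∧ prefs ≠ PySem.Dict.getD (PySem.Dict.mk user_map) user [] ∧ st.1 ≠ none then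
    (st.1.map (fun bl => bl ++ [user]), score)
  else st

theorem nmLoop_ge (x y : List String) (c : Int) : c ≤ nmLoop x y c := by
  induction x, y, c using nmLoop.induct with
  | case1 x xs y ys c h ih => rw [nmLoop]; simp only [h, if_pos]; omega
  | case2 x xs y ys c h1 h2 ih => rw [nmLoop]; simp [h1, h2]; exact ih
  | case3 x xs y ys c h1 h2 ih => rw [nmLoop]; simp [h1, h2]; exact ih
  | case4 x y c h =>
    cases x with
    | nil => rw [nmLoop.eq_def]; try simp
    | cons a as =>
      cases y with
      | nil => rw [nmLoop.eq_def]; try simp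
      | cons b bs => exact (h a as b bs rfl rfl).elim

theorem pvScore_nonneg (prefs : List String) (user_map : List (String × List String)) (u : String) :
    0 ≤ pvScore prefs user_map u := nmLoop_ge _ _ 0

theorem pvMax_nonneg (c : String) (p : List String) (um : List (String × List String)) (l : List String) :
    0 ≤ pvMax c p um l := by
  induction l with
  | nil => simp [pvMax]
  | cons u t ih =>
    simp only [pvMax]
    split
    · exact le_max_of_le_right ih
    · exact ih

-- the loop body, rephrased as a three-way case split on the eligibility test
theorem pvStep_eq (c : String) (p : List String) (um : List (String × List String))
    (st : Option (List String) × Int) (u : String) :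
    pvStep c p um st u =
      if pvEA c p um u = true then
        (if pvScore p um u > st.2 then (some [u], pvScore p um u)
         else if pvScore p um u = st.2 ∧ st.1 ≠ none then (st.1.map (fun bl => bl ++ [u]), pvScore p um u)
         else st)
      else st := by
  simp only [pvStep, pvEA, pvScore, pvVal]
  by_cases h1 : c ≠ u <;> by_cases h2 : p ≠ PySem.Dict.getD (PySem.Dict.mk um) u [] <;>
    simp [h1, h2]

theorem foldl_max_shift (l : List Int) (a b : Int) :
    l.foldl max (max a b) = max a (l.foldl max b) := by
  induction l generalizing a b with
  | nil => rfl
  | cons x t ih =>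
    simp only [List.foldl_cons]
    rw [max_assoc, ih]

theorem foldA_some (c : String) (p : List String) (um : List (String × List String)) :
    ∀ (l : List String) (acc : List String) (M : Int), 0 < M →
    List.foldl (pvStep c p um) (some acc, M) l =
      (some ((if max M (pvMax c p um l) = M then acc else []) ++
             l.filter (fun u => pvEA c p um u && decide (pvScore p um u = max M (pvMax c p um l)))),
       max M (pvMax c p um l)) := by
  intro l
  induction l with
  | nil =>
    intro acc M hM
    simp [pvMax, max_eq_left (le_of_lt hM)]
  | cons u t ih =>
    intro acc M hM
    simp only [List.foldl_cons]
    by_cases hEA : pvEA c p um u = true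
    · rcases lt_trichotomy M (pvScore p um u) with hs | hs | hs
      · -- score > best_score: restart the tie list
        have hstep : pvStep c p um (some acc, M) u = (some [u], pvScore p um u) := by
          rw [pvStep_eq, if_pos hEA, if_pos hs]
        rw [hstep, ih [u] (pvScore p um u) (lt_trans hM hs)]
        have hM' : pvMax c p um (u :: t) = max (pvScore p um u) (pvMax c p um t) := by
          simp only [pvMax, hEA, if_pos]
        have hKM : max M (pvMax c p um (u :: t)) = max (pvScore p um u) (pvMax c p um t) := by
          rw [hM', max_eq_right]
          exact le_trans (le_of_lt hs) (le_max_left _ _)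
        rw [hKM]
        set K := max (pvScore p um u) (pvMax c p um t) with hK
        have hsK : pvScore p um u ≤ K := le_max_left _ _
        have hne : ¬ (K = M) := by omega
        rw [if_neg hne, List.filter_cons]
        by_cases hq : pvScore p um u = K
        · simp [hEA, hq]
        · have hq' : ¬ (K = pvScore p um u) := fun h => hq h.symm
          simp [hEA, hq, hq']
      · -- score == best_score: append to the tie list
        have hstep : pvStep c p um (some acc, M) u = (some (acc ++ [u]), pvScore p um u) := by
          rw [pvStep_eq, if_pos hEA, if_neg (by omega), if_pos ⟨hs.symm, by simp⟩]
          rfl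
        rw [hstep, ← hs, ih (acc ++ [u]) M hM]
        have hM' : pvMax c p um (u :: t) = max M (pvMax c p um t) := by
          simp only [pvMax, hEA, if_pos, ← hs]
        have hKK : max M (pvMax c p um (u :: t)) = max M (pvMax c p um t) := by
          rw [hM', ← max_assoc, max_self]
        rw [hKK]
        set K := max M (pvMax c p um t) with hK
        have hMK : M ≤ K := le_max_left _ _
        rw [List.filter_cons]
        by_cases hKk : K = M
        · have hsq : pvScore p um u = K := by omega
          simp [hKk, hEA, hsq]
        · have hsq : ¬ (pvScore p um u = K) := by omega
          simp [hKk, hEA, hsq]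
      · -- score < best_score: skip
        have hstep : pvStep c p um (some acc, M) u = (some acc, M) := by
          rw [pvStep_eq, if_pos hEA, if_neg (by omega), if_neg (by
            intro h; omega)]
        rw [hstep, ih acc M hM]
        have hM' : pvMax c p um (u :: t) = max (pvScore p um u) (pvMax c p um t) := by
          simp only [pvMax, hEA, if_pos]
        have hKM : max M (pvMax c p um (u :: t)) = max M (pvMax c p um t) := by
          rw [hM', ← max_assoc, max_eq_left (le_of_lt hs)]
        rw [hKM]
        set K := max M (pvMax c p um t) with hK
        have hMK : M ≤ K := le_max_left _ _
        have hsq : ¬ (pvScore p um u = K) := by omega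
        rw [List.filter_cons]
        simp [hEA, hsq]
    · -- ineligible user: skip
      have hstep : pvStep c p um (some acc, M) u = (some acc, M) := by
        rw [pvStep_eq, if_neg hEA]
      rw [hstep, ih acc M hM]
      have hM' : pvMax c p um (u :: t) = pvMax c p um t := by
        simp only [pvMax, hEA, Bool.false_eq_true, if_false]
      rw [hM', List.filter_cons]
      simp [hEA]

theorem foldA_none (c : String) (p : List String) (um : List (String × List String)) :
    ∀ (l : List String),
    List.foldl (pvStep c p um) (none, 0) l =
      ((if pvMax c p um l = 0 then none
        else some (l.filter (fun u => pvEA c p um u && decide (pvScore p um u = pvMax c p um l)))),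
       pvMax c p um l) := by
  intro l
  induction l with
  | nil => simp [pvMax]
  | cons u t ih =>
    simp only [List.foldl_cons]
    by_cases hEA : pvEA c p um u = true
    · rcases lt_or_ge 0 (pvScore p um u) with hs | hs
      · -- positive score: the tie list starts here
        have hstep : pvStep c p um ((none : Option (List String)), (0 : Int)) u
            = (some [u], pvScore p um u) := by
          rw [pvStep_eq, if_pos hEA, if_pos hs]
        rw [hstep, foldA_some c p um t [u] (pvScore p um u) hs]
        have hM' : pvMax c p um (u :: t) = max (pvScore p um u) (pvMax c p um t) := by
          simp only [pvMax, hEA, if_pos]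
        rw [hM']
        set K := max (pvScore p um u) (pvMax c p um t) with hK
        have hsK : pvScore p um u ≤ K := le_max_left _ _
        have hKpos : 0 < K := lt_of_lt_of_le hs hsK
        rw [if_neg (show ¬ (K = 0) by omega), List.filter_cons]
        by_cases hq : pvScore p um u = K
        · simp [hEA, hq]
        · have hq' : ¬ (K = pvScore p um u) := fun h => hq h.symm
          simp [hEA, hq, hq']
      · -- score 0 (scores are nonnegative): nothing happens
        have hs0 : pvScore p um u = 0 := le_antisymm hs (pvScore_nonneg p um u)
        have hstep : pvStep c p um ((none : Option (List String)), (0 : Int)) u = (none, 0) := by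
          rw [pvStep_eq, if_pos hEA, if_neg (by omega), if_neg (by simp)]
        rw [hstep, ih]
        have hM' : pvMax c p um (u :: t) = pvMax c p um t := by
          have h0 := pvMax_nonneg c p um t
          simp only [pvMax, hEA, if_pos, hs0]
          omega
        rw [hM', List.filter_cons]
        by_cases hz : pvMax c p um t = 0
        · simp [hz]
        · have hpos : 0 < pvMax c p um t :=
            lt_of_le_of_ne (pvMax_nonneg c p um t) (Ne.symm hz)
          have hne : ¬ (pvScore p um u = pvMax c p um t) := by omega
          simp [hz, hEA, hne]
    · -- ineligible user: skip
      have hstep : pvStep c p um ((none : Option (List String)), (0 : Int)) u = (none, 0) := by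
        rw [pvStep_eq, if_neg hEA]
      rw [hstep, ih]
      have hM' : pvMax c p um (u :: t) = pvMax c p um t := by
        simp only [pvMax, hEA, Bool.false_eq_true, if_false]
      rw [hM', List.filter_cons]
      simp [hEA]

-- B's maximum (Python max with default 0) is the running maximum
theorem max_getD_eq_foldl (ss : List Int) (h : ∀ x ∈ ss, 0 ≤ x) :
    (PySem.List.max? ss (fun s => s)).getD 0 = ss.foldl max 0 := by
  cases ss with
  | nil => simp [PySem.List.max?]
  | cons x t =>
    rw [PySem.List.max?_id_cons]
    have hx : max 0 x = x := max_eq_right (h x (by simp))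
    simp [hx]

theorem pvMax_eq_foldl (c : String) (p : List String) (um : List (String × List String)) (l : List String) :
    ((l.filter (pvEA c p um)).map (pvScore p um)).foldl max 0 = pvMax c p um l := by
  induction l with
  | nil => rfl
  | cons u t ih =>
    by_cases hEA : pvEA c p um u = true
    · simp only [List.filter_cons, hEA, if_pos, List.map_cons, List.foldl_cons, pvMax]
      rw [max_comm 0 (pvScore p um u), foldl_max_shift, ih]
    · simp only [List.filter_cons, hEA, Bool.false_eq_true, if_false, pvMax]
      rw [ih]

-- ===== VERDICT (by name: the statement is the Claim_ definition above) =====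
theorem find_best_user_spec : Claim_equal_find_best_user := by
  intro c p um _
  unfold Spec_find_best_user find_best_user find_best_user_alt
  dsimp only
  have hposs : (PySem.Dict.keys (PySem.Dict.mk um)).foldl
      (fun acc user => if !PySem.Str.isIn "$" user then acc ++ [user] else acc) []
      = (PySem.Dict.keys (PySem.Dict.mk um)).filter (fun u => !PySem.Str.isIn "$" u) := by
    rw [PySem.List.foldl_append_if_eq_filter]; simp
  rw [hposs]
  set keys := PySem.Dict.keys (PySem.Dict.mk um) with hkeys
  set l0 := keys.filter (fun u => !PySem.Str.isIn "$" u) with hl0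
  show (List.foldl (pvStep c p um) ((none : Option (List String)), (0 : Int)) l0).1 = _
  rw [foldA_none c p um l0]
  have hfilter : keys.filter (fun user =>
      !PySem.Str.isIn "$" user && decide (c ≠ user) && decide (p ≠ PySem.Dict.getD (PySem.Dict.mk um) user []))
      = l0.filter (pvEA c p um) := by
    rw [hl0, List.filter_filter]
    apply List.filter_congr
    intro x _
    simp only [pvEA, pvVal]
    by_cases h1 : c ≠ x <;> by_cases h2 : p ≠ PySem.Dict.getD (PySem.Dict.mk um) x [] <;>
      cases hb : (!PySem.Str.isIn "$" x) <;> simp [h1, h2]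
  rw [hfilter]
  have hmapsnd : ((l0.filter (pvEA c p um)).map
        (fun user => (user, num_matches p (PySem.Dict.getD (PySem.Dict.mk um) user [])))).map Prod.snd
      = (l0.filter (pvEA c p um)).map (pvScore p um) := by
    rw [List.map_map]; rfl
  rw [hmapsnd]
  have hnn : ∀ x ∈ (l0.filter (pvEA c p um)).map (pvScore p um), (0:Int) ≤ x := by
    intro x hx
    rcases List.mem_map.mp hx with ⟨v, _, rfl⟩
    exact pvScore_nonneg p um v
  rw [max_getD_eq_foldl _ hnn, pvMax_eq_foldl c p um l0]
  set K := pvMax c p um l0 with hKdef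
  by_cases hK : K = 0
  · simp [hK]
  · rw [if_neg hK]
    have hb : (K == 0) = false := by simpa using hK
    rw [hb]
    simp only [Bool.false_eq_true, if_false]
    congr 1
    rw [List.filter_map, List.map_map]
    have hfe : (l0.filter (pvEA c p um)).filter
        ((fun pr => pr.2 == K) ∘ (fun user => (user, num_matches p (PySem.Dict.getD (PySem.Dict.mk um) user []))))
        = l0.filter (fun u => pvEA c p um u && decide (pvScore p um u = K)) := by
      rw [List.filter_filter]
      apply List.filter_congr
      intro x _
      simp only [Function.comp, pvScore, pvVal]
      by_cases h1 : pvEA c p um x = true <;>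
        by_cases h2 : num_matches p (PySem.Dict.getD (PySem.Dict.mk um) x []) = K <;>
          simp [h1, h2]
    rw [hfe]
    rw [show (Prod.fst ∘ fun user : String => (user, num_matches p (PySem.Dict.getD (PySem.Dict.mk um) user []))) = id from rfl, List.map_id]
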